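-- pv_equiv track=rewrite | github.com/TurboCheetah/finance-analysis-agent | alembic/versions/7e3b4c2d1f90_flex_budget_bucket_definitions_and_mappings.py | _canonical_bucket_key
-- ===== SOURCE A (Python) =====
-- _ALLOWED_BUCKET_KEYS = {"fixed", "non_monthly", "flex"}
--
-- def _canonical_bucket_key(raw_name: str | None) -> str | None:
--     if raw_name is None:
--         return None
--     normalized = raw_name.strip().lower().replace("-", "_").replace(" ", "_")
--     while "__" in normalized:
--         normalized = normalized.replace("__", "_")
--     if normalized in _ALLOWED_BUCKET_KEYS:
--         return normalized
--     return None
-- ===== SOURCE B (Python) =====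
-- _ALLOWED_BUCKET_KEYS = {"fixed", "non_monthly", "flex"}
--
-- def _canonical_bucket_key(raw_name):
--     if raw_name is None:
--         return None
--     normalized = raw_name.strip().lower().replace("-", "_").replace(" ", "_")
--     out = []
--     for ch in normalized:
--         if ch == "_" and out and out[-1] == "_":
--             continue
--         out.append(ch)
--     key = "".join(out)
--     return key if key in _ALLOWED_BUCKET_KEYS else None
-- ===== Notes on version B (the rewrite author's own statement) =====
-- stated objective: simpler
-- what changed: A's while-loop of repeated whole-string replace passes that shrink runs of consecutive underscores is replaced by a single left-to-right pass that skips each underscore immediately following an emitted underscore.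
import Mathlib
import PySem

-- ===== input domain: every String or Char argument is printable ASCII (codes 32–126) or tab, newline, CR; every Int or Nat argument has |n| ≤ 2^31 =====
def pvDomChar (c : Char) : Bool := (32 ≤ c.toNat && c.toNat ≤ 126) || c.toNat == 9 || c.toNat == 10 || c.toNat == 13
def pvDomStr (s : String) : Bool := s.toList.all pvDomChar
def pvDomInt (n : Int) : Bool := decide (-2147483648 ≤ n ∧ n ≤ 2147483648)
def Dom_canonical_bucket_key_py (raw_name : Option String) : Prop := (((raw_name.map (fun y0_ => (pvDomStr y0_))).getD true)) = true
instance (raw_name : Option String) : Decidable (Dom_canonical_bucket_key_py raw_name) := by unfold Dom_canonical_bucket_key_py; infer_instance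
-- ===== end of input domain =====

-- B replaces A's while-loop of repeated replace("__","_") passes by a single pass that
-- skips an underscore emitted right after an underscore (objective: simpler, one pass).

-- ===== PORT A =====
-- the while loop 'while "__" in normalized: normalized = normalized.replace("__", "_")',
-- made total with fuel = length of the string (each iteration strictly shrinks it;
-- the fuel only guarantees termination, it is never exhausted)
def canonicalLoopA : Nat → List Char → List Char
  | 0, s => s
  | fuel + 1, s =>
    if PySem.Chars.isIn ['_', '_'] s then
      canonicalLoopA fuel (PySem.Chars.replace s ['_', '_'] ['_'])
    else s

def canonical_bucket_key_py (raw_name : Option String) : Option String :=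
  match raw_name with
  | none => none
  | some s =>
    let normalized :=
      PySem.Chars.replace
        (PySem.Chars.replace (PySem.Chars.lower (PySem.Chars.strip s.toList)) ['-'] ['_'])
        [' '] ['_']
    let normalized := canonicalLoopA normalized.length normalized
    let key := String.mk normalized
    if key = "fixed" ∨ key = "non_monthly" ∨ key = "flex" then some key else none

-- ===== PORT B =====
-- one step of B's loop: skip '_' when the last emitted character is '_', else append
def bStep (out : List Char) (ch : Char) : List Char :=
  if ch = '_' ∧ out.getLast? = some '_' then out else out ++ [ch]

def canonical_bucket_key_py_alt (raw_name : Option String) : Option String :=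
  match raw_name with
  | none => none
  | some s =>
    let normalized :=
      PySem.Chars.replace
        (PySem.Chars.replace (PySem.Chars.lower (PySem.Chars.strip s.toList)) ['-'] ['_'])
        [' '] ['_']
    let key := String.mk (normalized.foldl bStep [])
    if key = "fixed" ∨ key = "non_monthly" ∨ key = "flex" then some key else none

-- ===== PRECONDITION & SPEC =====
def Spec_canonical_bucket_key_py (raw_name : Option String) (out : Option String) : Prop := out = canonical_bucket_key_py_alt raw_name
instance (raw_name : Option String) (out : Option String) : Decidable (Spec_canonical_bucket_key_py raw_name out) := by unfold Spec_canonical_bucket_key_py; infer_instance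

-- ===== CLAIM (what is proved, stated in full; the proofs are below) =====
def Claim_equal_canonical_bucket_key_py : Prop := ∀ (raw_name : Option String), Dom_canonical_bucket_key_py raw_name → Spec_canonical_bucket_key_py raw_name (canonical_bucket_key_py raw_name)

-- ===== LEMMAS AND PROOFS =====

-- what one replace("__","_") pass computes (leftmost, non-overlapping)
def rep : List Char → List Char
  | [] => []
  | '_' :: '_' :: t => '_' :: rep t
  | c :: t => c :: rep t

-- squeeze of consecutive underscores, parametrised by the last emitted character
def sqz : Option Char → List Char → List Char
  | _, [] => []
  | prev, c :: t => if c = '_' ∧ prev = some '_' then sqz prev t else c :: sqz (some c) t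

theorem rep_uu (t : List Char) : rep ('_' :: '_' :: t) = '_' :: rep t := by
  simp [rep]

theorem rep_cons (c : Char) (t : List Char) (h : ¬(c = '_' ∧ t.head? = some '_')) :
    rep (c :: t) = c :: rep t := by
  rw [rep.eq_def]
  split
  · rename_i heq; exact absurd heq (List.cons_ne_nil _ _)
  · rename_i t' heq
    obtain ⟨hc, ht⟩ := List.cons.inj heq
    exact absurd ⟨hc, by rw [ht]; rfl⟩ h
  · rename_i c' t' hne heq
    obtain ⟨hc, ht⟩ := List.cons.inj heq
    rw [hc, ht]

theorem head_ne_of_hne (c : Char) (t : List Char)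
    (hne : ∀ (t₁ : List Char), c = '_' → t = '_' :: t₁ → False) :
    ¬(c = '_' ∧ t.head? = some '_') := by
  rintro ⟨hc, ht⟩
  cases t with
  | nil => simp at ht
  | cons b t' =>
    simp only [List.head?_cons, Option.some.injEq] at ht
    exact hne t' hc (by rw [ht])

theorem rep_length_le (s : List Char) : (rep s).length ≤ s.length := by
  induction s using rep.induct with
  | case1 => simp [rep]
  | case2 t ih => rw [rep_uu]; simp only [List.length_cons]; omega
  | case3 c t hne ih =>
    rw [rep_cons c t (head_ne_of_hne c t hne)]
    simp only [List.length_cons]; omega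

theorem rep_length_lt (s : List Char) (h : ['_', '_'] <:+: s) :
    (rep s).length < s.length := by
  induction s using rep.induct with
  | case1 => simp at h
  | case2 t ih =>
    have := rep_length_le t
    rw [rep_uu]; simp only [List.length_cons]; omega
  | case3 c t hne ih =>
    rw [rep_cons c t (head_ne_of_hne c t hne)]
    simp only [List.length_cons, Nat.add_lt_add_iff_right]
    apply ih
    rcases List.infix_cons_iff.mp h with hp | hi
    · exfalso
      obtain ⟨r, hr⟩ := hp
      simp only [List.cons_append, List.nil_append, List.cons.injEq] at hr
      exact hne r hr.1.symm hr.2.symm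
    · exact hi

theorem replace_go_eq_rep (fuel : Nat) (l acc : List Char) (h : l.length ≤ fuel) :
    PySem.Chars.replace.go ['_', '_'] ['_'] fuel l acc = acc.reverse ++ rep l := by
  induction fuel generalizing l acc with
  | zero =>
    have : l = [] := List.eq_nil_of_length_eq_zero (Nat.le_zero.mp h)
    subst this; simp [PySem.Chars.replace.go, rep]
  | succ fuel ih =>
    match l with
    | [] => simp [PySem.Chars.replace.go, rep]
    | c :: t =>
      rw [PySem.Chars.replace.go]
      by_cases hp : List.isPrefixOf ['_', '_'] (c :: t)
      · rw [if_pos hp]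
        cases t with
        | nil => simp [List.isPrefixOf] at hp
        | cons b t' =>
          have hcb : '_' = c ∧ '_' = b := by
            simpa [List.isPrefixOf, and_assoc] using hp
          obtain ⟨hc, hb⟩ := hcb
          subst hc; subst hb
          simp only [List.length_cons] at h
          rw [show List.drop (['_', '_'] : List Char).length ('_' :: '_' :: t') = t' from rfl,
            ih t' (['_'].reverse ++ acc) (by omega), rep_uu]
          simp
      · rw [if_neg hp]
        simp only [List.length_cons] at h
        rw [ih t (c :: acc) (by omega)]
        have hrep : rep (c :: t) = c :: rep t := by
          apply rep_cons
          rintro ⟨hc, ht⟩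
          subst hc
          cases t with
          | nil => simp at ht
          | cons b t' =>
            simp only [List.head?_cons, Option.some.injEq] at ht
            subst ht
            simp [List.isPrefixOf] at hp
        rw [hrep]
        simp

theorem replace_eq_rep (s : List Char) :
    PySem.Chars.replace s ['_', '_'] ['_'] = rep s := by
  rw [PySem.Chars.replace]
  simp only [List.isEmpty_cons, Bool.false_eq_true, if_false]
  simpa using replace_go_eq_rep s.length s [] le_rfl

theorem sqz_rep (s : List Char) : ∀ prev, sqz prev (rep s) = sqz prev s := by
  induction s using rep.induct with
  | case1 => intro prev; simp [rep]
  | case2 t ih =>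
    intro prev
    rw [rep_uu]
    by_cases hp : prev = some '_'
    · simp [sqz, hp, ih]
    · simp [sqz, hp, ih]
  | case3 c t hne ih =>
    intro prev
    rw [rep_cons c t (head_ne_of_hne c t hne)]
    by_cases hc : c = '_' ∧ prev = some '_'
    · simp [sqz, hc, ih]
    · simp [sqz, hc, ih]

theorem sqz_of_no_double (s : List Char) : ∀ prev, ¬ ['_', '_'] <:+: s →
    ¬(prev = some '_' ∧ s.head? = some '_') → sqz prev s = s := by
  induction s with
  | nil => intro prev _ _; simp [sqz]
  | cons c t ih =>
    intro prev hinf hh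
    have hcond : ¬(c = '_' ∧ prev = some '_') := by
      rintro ⟨hc, hp⟩; exact hh ⟨hp, by rw [hc]; rfl⟩
    simp only [sqz, hcond, if_neg, not_false_eq_true, List.cons.injEq, true_and]
    apply ih
    · intro hi; exact hinf (List.infix_cons_iff.mpr (Or.inr hi))
    · rintro ⟨hc, ht⟩
      simp only [Option.some.injEq] at hc
      cases t with
      | nil => simp at ht
      | cons b t' =>
        simp only [List.head?_cons, Option.some.injEq] at ht
        apply hinf
        apply List.infix_cons_iff.mpr (Or.inl _)
        exact ⟨t', by rw [hc, ht]; rfl⟩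

theorem loopA_eq_sqz (fuel : Nat) (s : List Char) (h : s.length ≤ fuel) :
    canonicalLoopA fuel s = sqz none s := by
  induction fuel generalizing s with
  | zero =>
    have : s = [] := List.eq_nil_of_length_eq_zero (Nat.le_zero.mp h)
    subst this; simp [canonicalLoopA, sqz]
  | succ fuel ih =>
    rw [canonicalLoopA]
    by_cases hin : PySem.Chars.isIn ['_', '_'] s
    · have hinf : ['_', '_'] <:+: s := (PySem.Chars.isIn_iff_infix _ _).mp hin
      rw [if_pos hin, replace_eq_rep]
      rw [ih (rep s) (by have := rep_length_lt s hinf; omega)]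
      exact sqz_rep s none
    · rw [if_neg hin]
      have hinf : ¬ ['_', '_'] <:+: s := by
        rw [← PySem.Chars.isIn_iff_infix]; simpa using hin
      exact (sqz_of_no_double s none hinf (by simp)).symm

theorem foldl_bStep (l : List Char) : ∀ acc, List.foldl bStep acc l = acc ++ sqz acc.getLast? l := by
  induction l with
  | nil => intro acc; simp [sqz]
  | cons c t ih =>
    intro acc
    rw [List.foldl_cons, bStep]
    by_cases hc : c = '_' ∧ acc.getLast? = some '_'
    · rw [if_pos hc, ih]
      simp [sqz, hc]
    · rw [if_neg hc, ih]
      simp only [List.getLast?_concat]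
      simp [sqz, hc]

theorem loop_eq_foldl (l : List Char) : canonicalLoopA l.length l = List.foldl bStep [] l := by
  rw [loopA_eq_sqz l.length l le_rfl, foldl_bStep]
  simp

-- ===== VERDICT (by name: the statement is the Claim_ definition above) =====
theorem canonical_bucket_key_py_spec : Claim_equal_canonical_bucket_key_py := by
  intro raw_name _
  unfold Spec_canonical_bucket_key_py
  cases raw_name with
  | none => rfl
  | some s =>
    simp only [canonical_bucket_key_py, canonical_bucket_key_py_alt]
    rw [loop_eq_foldl]
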